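-- pv_equiv track=rewrite | github.com/vincentnam/OS_data_interop_RCIS_2023 | matching.py | from_keyset_to_csv
-- ===== SOURCE A (Python) =====
-- def from_keyset_to_csv(key_set, separator="."):
--     '''
--     :param key_set:
--     :param separator:
--     :return:
--     '''
--     color = {"0": "#F3722C", "1": "#F8961E", "2": "#F9C74F", "3": "#90BE6D", "4": "#43AA8B", "5": "#4D908E",
--              "6": "#577590", "7": "#277DA1", "8": "#bdd5ea", "9": "#e3e2e3", "10": "#ffffff", "11": "#ffffff"}
--     csv_list = [("ROOT_NODE", "", -1, "#F94144")]
--     for key_concat in key_set: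
--         key_split = key_concat.split(separator)
--         for index in range(len(key_split)):
--             if index < 9:
--                 if len(key_split) == 1:
--                     csv_list.append((separator.join(key_split[:index + 1]), "ROOT_NODE", index, color[str(index)]))
--                     break
--                 if index == len(key_split) - 1:
--                     break
--                 csv_list.append((
--                     separator.join(key_split[:index + 2]), separator.join(key_split[:index + 1]), index + 1,
--                     color[str(index + 1)]))
--
--             else:
--                 if index == len(key_split) - 1:
--                     break
--                 csv_list.append((
--                     separator.join(key_split[:index + 2]), separator.join(key_split[:index + 1]), index + 1,
--                     "#ffffff"))
--     return (["key", "mother_key", "level", "color"], set(csv_list))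
-- ===== SOURCE B (Python) =====
-- def from_keyset_to_csv(key_set, separator="."):
--     palette = ["#F3722C", "#F8961E", "#F9C74F", "#90BE6D", "#43AA8B",
--                "#4D908E", "#577590", "#277DA1", "#bdd5ea", "#e3e2e3"]
--
--     def walk(prefix, rest, lvl):
--         # recursive descent: grow the joined prefix incrementally, no slicing
--         if not rest:
--             return []
--         child = separator.join([prefix, rest[0]])
--         row = (child, prefix, lvl, palette[lvl] if lvl < 10 else "#ffffff")
--         return [row] + walk(child, rest[1:], lvl + 1)
--
--     rows = {("ROOT_NODE", "", -1, "#F94144")}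
--     for key in key_set:
--         first, *rest = key.split(separator)
--         if not rest:
--             rows.add((first, "ROOT_NODE", 0, palette[0]))
--         else:
--             rows.update(walk(first, rest, 1))
--     return (["key", "mother_key", "level", "color"], rows)
-- ===== Notes on version B (the rewrite author's own statement) =====
-- stated objective: alternative
-- what changed: Replaces A's index loop with breaks, per-index slice-and-join and a str-keyed color dict by a recursive descent per key that grows the joined prefix incrementally (no slicing/joining of prefixes), with a palette list indexed by level, accumulating directly into a set built with add/update.
import Mathlib
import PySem

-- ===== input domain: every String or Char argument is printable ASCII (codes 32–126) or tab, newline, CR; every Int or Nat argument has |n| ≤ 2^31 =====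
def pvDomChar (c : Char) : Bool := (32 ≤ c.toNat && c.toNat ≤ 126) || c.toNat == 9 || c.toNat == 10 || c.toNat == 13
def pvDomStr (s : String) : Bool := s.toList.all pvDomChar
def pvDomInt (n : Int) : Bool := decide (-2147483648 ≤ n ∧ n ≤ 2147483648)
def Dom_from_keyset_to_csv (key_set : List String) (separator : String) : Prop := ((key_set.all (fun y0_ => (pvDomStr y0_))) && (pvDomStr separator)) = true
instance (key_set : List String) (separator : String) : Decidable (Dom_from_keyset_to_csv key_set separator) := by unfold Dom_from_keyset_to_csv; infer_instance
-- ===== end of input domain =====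

-- B replaces A's index loop with breaks, slice-joined prefixes and a str-keyed color
-- dict by a recursive descent per key that grows the joined prefix incrementally and
-- accumulates straight into the set (objective: alternative decomposition).

-- ===== PORT A =====
-- the 'color' dict of A (insertion order, distinct keys)
def pvColorA : PySem.Dict String String := PySem.Dict.ofList
  [("0", "#F3722C"), ("1", "#F8961E"), ("2", "#F9C74F"), ("3", "#90BE6D"), ("4", "#43AA8B"),
   ("5", "#4D908E"), ("6", "#577590"), ("7", "#277DA1"), ("8", "#bdd5ea"), ("9", "#e3e2e3"),
   ("10", "#ffffff"), ("11", "#ffffff")]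

-- 'for index in range(len(key_split)): …' with its three 'break's, as recursion on index;
-- color[str(j)] is ported as get? + getD "" — the looked-up key (0 ≤ j ≤ 9) is always present.
def pvALoop (sep : String) (ks : List String) (index : Nat) : List (String × String × Int × String) :=
  if index < ks.length then
    if index < 9 then
      if ks.length = 1 then
        [(PySem.Str.join sep (PySem.List.slice ks none (some ((index : Int) + 1))), "ROOT_NODE",
          (index : Int), (PySem.Dict.get? pvColorA (PySem.Int.toStr (index : Int))).getD "")]
      else if index = ks.length - 1 then []
      else
        (PySem.Str.join sep (PySem.List.slice ks none (some ((index : Int) + 2))),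
         PySem.Str.join sep (PySem.List.slice ks none (some ((index : Int) + 1))),
         (index : Int) + 1, (PySem.Dict.get? pvColorA (PySem.Int.toStr ((index : Int) + 1))).getD "")
        :: pvALoop sep ks (index + 1)
    else
      if index = ks.length - 1 then []
      else
        (PySem.Str.join sep (PySem.List.slice ks none (some ((index : Int) + 2))),
         PySem.Str.join sep (PySem.List.slice ks none (some ((index : Int) + 1))),
         (index : Int) + 1, "#ffffff")
        :: pvALoop sep ks (index + 1)
  else []
termination_by ks.length - index

def from_keyset_to_csv (key_set : List String) (separator : String) :
    List String × (List (String × String × Int × String)) :=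
  (["key", "mother_key", "level", "color"],
   PySem.Set.ofList
     (key_set.foldl
       (fun csv_list key_concat => csv_list ++ pvALoop separator (((PySem.Str.split? key_concat separator).getD [])) 0)
       [("ROOT_NODE", "", -1, "#F94144")]))

-- ===== PORT B =====
def pvPalette : List String :=
  ["#F3722C", "#F8961E", "#F9C74F", "#90BE6D", "#43AA8B",
   "#4D908E", "#577590", "#277DA1", "#bdd5ea", "#e3e2e3"]

-- Source B's recursive 'walk': grow the joined prefix incrementally, one row per step;
-- separator.join([prefix, rest[0]]) is PySem.Str.join, palette[lvl] is pyGetD (in range).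
def pvWalk (sep : String) (prefix1 : String) (rest : List String) (lvl : Int) :
    List (String × String × Int × String) :=
  match rest with
  | [] => []
  | r :: rs =>
    let child := PySem.Str.join sep [prefix1, r]
    (child, prefix1, lvl, if lvl < 10 then PySem.List.pyGetD pvPalette lvl "" else "#ffffff")
      :: pvWalk sep child rs (lvl + 1)

def from_keyset_to_csv_alt (key_set : List String) (separator : String) :
    List String × (List (String × String × Int × String)) :=
  (["key", "mother_key", "level", "color"],
   key_set.foldl
     (fun rows key =>
        match (PySem.Str.split? key separator).getD [] with
        | [] => rows
        | first :: rest =>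
          if rest = [] then
            PySem.Set.add rows (first, "ROOT_NODE", 0, PySem.List.pyGetD pvPalette 0 "")
          else
            PySem.Set.update rows (pvWalk separator first rest 1))
     (PySem.Set.ofList [("ROOT_NODE", "", -1, "#F94144")]))

-- ===== PRECONDITION & SPEC =====
-- Python's str.split raises ValueError on an empty separator (in both A and B) whenever a key is
-- actually split, i.e. key_set is nonempty; exactly those crashing inputs are excluded.
def Pre_from_keyset_to_csv (key_set : List String) (separator : String) : Prop := key_set = [] ∨ separator ≠ ""
instance (key_set : List String) (separator : String) : Decidable (Pre_from_keyset_to_csv key_set separator) := by unfold Pre_from_keyset_to_csv; infer_instance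

def pvWitness_from_keyset_to_csv : List String × String := (["a.b.c", "a"], ".")

def Spec_from_keyset_to_csv (key_set : List String) (separator : String) (out : List String × (List (String × String × Int × String))) : Prop := out = from_keyset_to_csv_alt key_set separator
instance (key_set : List String) (separator : String) (out : List String × (List (String × String × Int × String))) : Decidable (Spec_from_keyset_to_csv key_set separator out) := by unfold Spec_from_keyset_to_csv; infer_instance

-- ===== CLAIM (what is proved, stated in full; the proofs are below) =====
def Claim_equal_from_keyset_to_csv : Prop := ∀ (key_set : List String) (separator : String), Dom_from_keyset_to_csv key_set separator → Pre_from_keyset_to_csv key_set separator → Spec_from_keyset_to_csv key_set separator (from_keyset_to_csv key_set separator)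

-- ===== LEMMAS AND PROOFS =====

-- the common closed form of the non-root row at depth i (child prefix i+2, parent prefix i+1)
def pvRow (sep : String) (parts : List String) (i : Nat) : String × String × Int × String :=
  (PySem.Str.join sep (parts.take (i + 2)), PySem.Str.join sep (parts.take (i + 1)),
   (i : Int) + 1, if i + 1 < 10 then pvPalette.getD (i + 1) "" else "#ffffff")

lemma pvColor_eq (i : Nat) (h : i < 9) :
    (PySem.Dict.get? pvColorA (PySem.Int.toStr ((i : Int) + 1))).getD "" =
      (if i + 1 < 10 then pvPalette.getD (i + 1) "" else "#ffffff") := by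
  interval_cases i <;> decide

lemma pvSlice_take1 (parts : List String) (i : Nat) :
    PySem.List.slice parts none (some ((i : Int) + 1)) = parts.take (i + 1) := by
  have : ((i : Int) + 1) = (((i + 1 : Nat)) : Int) := by push_cast; ring
  rw [this, PySem.List.slice_to_natCast]

lemma pvSlice_take2 (parts : List String) (i : Nat) :
    PySem.List.slice parts none (some ((i : Int) + 2)) = parts.take (i + 2) := by
  have : ((i : Int) + 2) = (((i + 2 : Nat)) : Int) := by push_cast; ring
  rw [this, PySem.List.slice_to_natCast]

lemma pvALoop_closed (sep : String) (parts : List String) (h2 : 2 ≤ parts.length) :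
    ∀ (d index : Nat), d = parts.length - 1 - index → index ≤ parts.length - 1 →
      pvALoop sep parts index = (List.range' index d).map (pvRow sep parts) := by
  intro d
  induction d with
  | zero =>
    intro index hd hle
    have hidx : index = parts.length - 1 := by omega
    rw [pvALoop]
    have h1 : index < parts.length := by omega
    have hne : ¬ parts.length = 1 := by omega
    simp [hidx, hne, List.range']
  | succ d ih =>
    intro index hd hle
    have h1 : index < parts.length := by omega
    have hne : ¬ parts.length = 1 := by omega
    have hlt : ¬ index = parts.length - 1 := by omega
    have htail : pvALoop sep parts (index + 1) = (List.range' (index + 1) d).map (pvRow sep parts) := by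
      exact ih (index + 1) (by omega) (by omega)
    rw [pvALoop]
    by_cases h9 : index < 9
    · simp only [h1, h9, hne, hlt, if_true, if_false, htail, List.range']
      refine List.cons_eq_cons.mpr ⟨?_, rfl⟩
      rw [pvSlice_take2, pvSlice_take1, pvRow, pvColor_eq index h9]
    · simp only [h1, h9, hne, hlt, if_true, if_false, htail, List.range']
      refine List.cons_eq_cons.mpr ⟨?_, rfl⟩
      have h10 : ¬ index + 1 < 10 := by omega
      rw [pvSlice_take2, pvSlice_take1, pvRow]
      simp [h10]

-- B-side facts -------------------------------------------------------------

lemma pvJoin_singleton (sep x : String) : PySem.Str.join sep [x] = x := by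
  simp [pysem, PySem.Str.join]

lemma pvChars_join_snoc (S : List Char) (L : List (List Char)) (c : List Char) (h : L ≠ []) :
    PySem.Chars.join S (L ++ [c]) = PySem.Chars.join S L ++ S ++ c := by
  induction L with
  | nil => exact absurd rfl h
  | cons a L ih =>
    cases L with
    | nil =>
      simp [PySem.Chars.join_cons_cons, PySem.Chars.join_singleton, List.append_assoc]
    | cons b L' =>
      have hrec := ih (by simp)
      simp only [List.cons_append] at hrec ⊢
      rw [PySem.Chars.join_cons_cons, PySem.Chars.join_cons_cons, hrec]
      simp [List.append_assoc]

lemma pvStr_join_snoc (sep : String) (xs : List String) (x : String) (h : xs ≠ []) :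
    PySem.Str.join sep [PySem.Str.join sep xs, x] = PySem.Str.join sep (xs ++ [x]) := by
  have hm : xs.map String.toList ≠ [] := by simpa using h
  apply String.toList_inj.mp
  simp only [PySem.Str.toList_join, List.map_cons, List.map_nil, List.map_append]
  rw [pvChars_join_snoc _ _ _ hm]
  rw [PySem.Chars.join_cons_cons, PySem.Chars.join_singleton]

lemma pvWalk_closed (sep : String) (parts : List String) :
    ∀ (m t : Nat), 1 ≤ t → t + m = parts.length →
      pvWalk sep (PySem.Str.join sep (parts.take t)) (parts.drop t) (t : Int) =
        (List.range' (t - 1) m).map (pvRow sep parts) := by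
  intro m
  induction m with
  | zero =>
    intro t h1 hlen
    have : parts.drop t = [] := by
      apply List.drop_eq_nil_of_le; omega
    rw [this, pvWalk]
    simp [List.range']
  | succ m ih =>
    intro t h1 hlen
    have ht : t < parts.length := by omega
    have hdrop : parts.drop t = parts[t] :: parts.drop (t + 1) :=
      List.drop_eq_getElem_cons ht
    rw [hdrop, pvWalk]
    have htake : parts.take t ≠ [] := by
      intro hcon
      rcases List.take_eq_nil_iff.mp hcon with h0 | hnil
      · omega
      · rw [hnil] at hlen; simp at hlen
    have hchild : PySem.Str.join sep [PySem.Str.join sep (parts.take t), parts[t]] =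
        PySem.Str.join sep (parts.take (t + 1)) := by
      rw [pvStr_join_snoc sep _ _ htake, List.take_add_one, List.getElem?_eq_getElem ht]
      rfl
    have hrange : List.range' (t - 1) (m + 1) = (t - 1) :: List.range' t m := by
      have e : t - 1 + 1 = t := by omega
      rw [List.range', e]
    rw [hrange]
    simp only [List.map_cons, hchild]
    have htail : pvWalk sep (PySem.Str.join sep (parts.take (t + 1))) (parts.drop (t + 1)) ((t : Int) + 1) =
        (List.range' t m).map (pvRow sep parts) := by
      have := ih (t + 1) (by omega) (by omega)
      rw [show (((t + 1 : Nat)) : Int) = (t : Int) + 1 from by push_cast; ring] at this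
      rw [show (t + 1 - 1) = t from by omega] at this
      exact this
    refine List.cons_eq_cons.mpr ⟨?_, htail⟩
    rw [pvRow]
    have e1 : t - 1 + 2 = t + 1 := by omega
    have e2 : t - 1 + 1 = t := by omega
    have e3 : ((t - 1 : Nat) : Int) + 1 = (t : Int) := by omega
    rw [e1, e2, e3]
    have e4 : ((t : Int) < 10) ↔ (t < 10) := by omega
    by_cases h10 : t < 10
    · rw [if_pos h10, if_pos (e4.mpr h10), PySem.List.pyGetD_natCast]
    · rw [if_neg h10, if_neg (fun hc => h10 (e4.mp hc))]

lemma pvOfList_append (xs ys : List (String × String × Int × String)) :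
    PySem.Set.ofList (xs ++ ys) = PySem.Set.update (PySem.Set.ofList xs) ys := by
  rw [PySem.Set.ofList_eq_foldl, List.foldl_append, ← PySem.Set.ofList_eq_foldl]
  rfl

-- one key's contribution: updating the set with A's rows is exactly B's per-key step
lemma pvStep_eq (sep key : String) (s : PySem.Set (String × String × Int × String)) :
    PySem.Set.update s (pvALoop sep ((PySem.Str.split? key sep).getD []) 0) =
      (match (PySem.Str.split? key sep).getD [] with
       | [] => s
       | first :: rest =>
         if rest = [] then
           PySem.Set.add s (first, "ROOT_NODE", 0, PySem.List.pyGetD pvPalette 0 "")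
         else
           PySem.Set.update s (pvWalk sep first rest 1)) := by
  cases hp : (PySem.Str.split? key sep).getD [] with
  | nil =>
    rw [pvALoop]
    simp
  | cons first rest =>
    cases rest with
    | nil =>
      have hx : pvALoop sep [first] 0 = [(first, "ROOT_NODE", 0, "#F3722C")] := by
        have h1 : PySem.List.slice [first] none (some (((0 : Nat) : Int) + 1)) = [first] :=
          pvSlice_take1 [first] 0
        have hc : (PySem.Dict.get? pvColorA (PySem.Int.toStr ((0 : Nat) : Int))).getD "" = "#F3722C" := by
          decide
        rw [pvALoop]
        rw [if_pos (by simp : (0 : Nat) < [first].length)]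
        rw [if_pos (by norm_num : (0 : Nat) < 9)]
        rw [if_pos (by simp : [first].length = 1)]
        rw [h1, pvJoin_singleton, hc]
        norm_num
      simp only [hx]
      have : PySem.List.pyGetD pvPalette 0 "" = "#F3722C" := by decide
      rw [this]
      rfl
    | cons q rs =>
      have h2 : 2 ≤ (first :: q :: rs).length := by simp
      have ha : pvALoop sep (first :: q :: rs) 0 =
          (List.range' 0 ((first :: q :: rs).length - 1)).map (pvRow sep (first :: q :: rs)) := by
        exact pvALoop_closed sep _ h2 _ 0 (by omega) (by omega)
      have hb : pvWalk sep first (q :: rs) 1 =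
          (List.range' 0 ((first :: q :: rs).length - 1)).map (pvRow sep (first :: q :: rs)) := by
        have := pvWalk_closed sep (first :: q :: rs) ((first :: q :: rs).length - 1) 1 (le_refl 1)
          (by simp; omega)
        rw [show (first :: q :: rs).take 1 = [first] from rfl, pvJoin_singleton,
          show (first :: q :: rs).drop 1 = q :: rs from rfl, Nat.cast_one] at this
        simpa using this
      simp only [ha, ← hb]
      have hne : ¬ (q :: rs = ([] : List String)) := by simp
      rw [if_neg hne]

-- pull set(...) through A's list-append fold, turning it into B's set fold
lemma pvFoldSwap (sep : String) (ks : List String) :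
    ∀ (init : List (String × String × Int × String)),
      PySem.Set.ofList (ks.foldl
        (fun csv_list key_concat => csv_list ++ pvALoop sep (((PySem.Str.split? key_concat sep).getD [])) 0) init) =
      ks.foldl
        (fun rows key =>
          match (PySem.Str.split? key sep).getD [] with
          | [] => rows
          | first :: rest =>
            if rest = [] then
              PySem.Set.add rows (first, "ROOT_NODE", 0, PySem.List.pyGetD pvPalette 0 "")
            else
              PySem.Set.update rows (pvWalk sep first rest 1))
        (PySem.Set.ofList init) := by
  induction ks with
  | nil => intro init; rfl
  | cons k ks ih =>
    intro init
    simp only [List.foldl_cons]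
    rw [ih, pvOfList_append, pvStep_eq]

-- ===== VERDICT (by name: the statement is the Claim_ definition above) =====
theorem from_keyset_to_csv_spec : Claim_equal_from_keyset_to_csv := by
  intro key_set separator _ _
  unfold Spec_from_keyset_to_csv from_keyset_to_csv from_keyset_to_csv_alt
  exact congrArg (fun z => (["key", "mother_key", "level", "color"], z))
    (pvFoldSwap separator key_set [("ROOT_NODE", "", -1, "#F94144")])
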